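-- pv_equiv track=rewrite | github.com/julia-carneiro/PBL2-1SEMESTRE | bibliotecaJuliaSouza.py | analise_de_quebra
-- ===== SOURCE A (Python) =====
-- def analise_de_quebra(matriz):
--     quebrou = False
--     #analisa horizontal
--     for l in range(len(matriz)):
--         contador = 1
--         for c in range(len(matriz[0])-1):
--             if matriz[l][c].lower() == (matriz[l][c + 1]).lower():
--                 contador += 1
--             else:
--                 contador = 1
--             if contador >= 3:
--                 quebrou = True
--     #analisa vertical
--     for l in range(len(matriz[0])): #analisando coluna
--         contador = 1
--         for c in range(len(matriz)-1):  #analisando linha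
--             if matriz[c][l].lower() == (matriz[c+1][l]).lower():
--                 contador += 1
--             else:
--                 contador = 1
--             if contador >= 3:
--                 quebrou = True
--     return quebrou
-- ===== SOURCE B (Python) =====
-- def analise_de_quebra(matriz):
--     # Window-based scan: test each fixed 3-cell window directly (no run counter).
--     ncols = len(matriz[0])
--     nlin = len(matriz)
--     horiz = any(
--         matriz[l][c].lower() == matriz[l][c + 1].lower() == matriz[l][c + 2].lower()
--         for l in range(nlin) for c in range(ncols - 2))
--     vert = any(
--         matriz[c][l].lower() == matriz[c + 1][l].lower() == matriz[c + 2][l].lower()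
--         for l in range(ncols) for c in range(nlin - 2))
--     return horiz or vert
-- ===== Notes on version B (the rewrite author's own statement) =====
-- stated objective: simpler
-- what changed: Replaced the stateful run-length counter sweeps with direct any() tests of each fixed 3-cell window, horizontally and vertically, which also short-circuits on the first match instead of always scanning the whole matrix.
import Mathlib
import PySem

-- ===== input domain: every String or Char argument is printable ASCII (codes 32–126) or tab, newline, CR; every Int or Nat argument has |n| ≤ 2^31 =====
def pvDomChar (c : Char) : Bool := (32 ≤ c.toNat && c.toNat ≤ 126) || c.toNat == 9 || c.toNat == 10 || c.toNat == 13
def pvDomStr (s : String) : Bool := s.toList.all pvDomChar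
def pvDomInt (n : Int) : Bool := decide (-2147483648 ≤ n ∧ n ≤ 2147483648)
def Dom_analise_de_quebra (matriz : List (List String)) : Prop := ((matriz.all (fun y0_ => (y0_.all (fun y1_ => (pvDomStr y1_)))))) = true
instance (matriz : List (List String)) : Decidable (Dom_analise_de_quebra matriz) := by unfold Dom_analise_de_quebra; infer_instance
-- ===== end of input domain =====

-- B replaces A's run-length-counter sweeps by direct tests of each fixed 3-cell window (simpler decomposition, same cost).

-- shared cell accessor: matriz[l][c].lower() (indices here are always nonnegative and, under Pre_, in range)
def pvLowAt (matriz : List (List String)) (l c : Int) : String :=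
  PySem.Str.lower ((PySem.List.pyGet? ((PySem.List.pyGet? matriz l).getD []) c).getD "")

-- ===== PORT A =====
-- one counter step of A's inner loop, over a line accessor v
def pvStep (v : Int → String) (s : Bool × Int) (c : Int) : Bool × Int :=
  let contador : Int := if v c == v (c + 1) then s.2 + 1 else 1
  (s.1 || decide ((3 : Int) ≤ contador), contador)

-- A's inner loop over one line of n cells: counter fold over range(n-1), flag result
def pvLineA (v : Int → String) (n : Int) (quebrou : Bool) : Bool :=
  ((PySem.List.pyRange 0 (n - 1) 1).foldl (pvStep v) (quebrou, (1 : Int))).1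

def analise_de_quebra (matriz : List (List String)) : Bool :=
  let nlin : Int := matriz.length
  let ncols : Int := ((PySem.List.pyGet? matriz 0).getD []).length
  let q1 : Bool := (PySem.List.pyRange 0 nlin 1).foldl
      (fun quebrou l => pvLineA (fun c => pvLowAt matriz l c) ncols quebrou) false
  (PySem.List.pyRange 0 ncols 1).foldl
      (fun quebrou l => pvLineA (fun c => pvLowAt matriz c l) nlin quebrou) q1

-- ===== PORT B =====
-- B's window test on one line of n cells: some c has v c == v (c+1) == v (c+2)
def pvWinB (v : Int → String) (n : Int) : Bool :=
  (PySem.List.pyRange 0 (n - 2) 1).any (fun c => (v c == v (c + 1)) && (v (c + 1) == v (c + 2)))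

def analise_de_quebra_alt (matriz : List (List String)) : Bool :=
  let ncols : Int := ((PySem.List.pyGet? matriz 0).getD []).length
  let nlin : Int := matriz.length
  let horiz : Bool := (PySem.List.pyRange 0 nlin 1).any
      (fun l => pvWinB (fun c => pvLowAt matriz l c) ncols)
  let vert : Bool := (PySem.List.pyRange 0 ncols 1).any
      (fun l => pvWinB (fun c => pvLowAt matriz c l) nlin)
  horiz || vert

-- ===== PRECONDITION & SPEC =====
-- Pre_ excludes exactly the inputs on which Python A raises IndexError: the empty matrix
-- (len(matriz[0])) and, when there is more than one row, matrices with a row shorter than row 0.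
def Pre_analise_de_quebra (matriz : List (List String)) : Prop :=
  matriz ≠ [] ∧ (matriz.length = 1 ∨ ∀ row ∈ matriz, (matriz.headD []).length ≤ row.length)
instance (matriz : List (List String)) : Decidable (Pre_analise_de_quebra matriz) := by
  unfold Pre_analise_de_quebra; infer_instance
def pvWitness_analise_de_quebra : List (List String) := [["a", "B"], ["A", "c"]]
def Spec_analise_de_quebra (matriz : List (List String)) (out : Bool) : Prop := out = analise_de_quebra_alt matriz
instance (matriz : List (List String)) (out : Bool) : Decidable (Spec_analise_de_quebra matriz out) := by unfold Spec_analise_de_quebra; infer_instance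

-- ===== CLAIM (what is proved, stated in full; the proofs are below) =====
def Claim_equal_analise_de_quebra : Prop := ∀ (matriz : List (List String)), Dom_analise_de_quebra matriz → Pre_analise_de_quebra matriz → Spec_analise_de_quebra matriz (analise_de_quebra matriz)

-- ===== LEMMAS AND PROOFS =====

-- the window fired at step c: the pair ending at c and the pair starting at c are both equal
def pvWin (v : Int → String) (c : Int) : Bool := (v (c - 1) == v c) && (v c == v (c + 1))

theorem pvFoldl_or (f : Int → Bool) (xs : List Int) (q : Bool) :
    xs.foldl (fun q x => q || f x) q = (q || xs.any f) := by
  induction xs generalizing q with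
  | nil => simp
  | cons x xs ih => simp [List.foldl_cons, ih, Bool.or_assoc]

-- counter invariant: starting at index a with counter k, where k ≥ 2 iff the pair ending
-- at a is equal, the fold's flag ends up q || (some window in [a, a+m) fires)
theorem pvCounter_run (v : Int → String) (m : Nat) :
    ∀ (a : Int) (q : Bool) (k : Int), 1 ≤ k →
      (((2 : Int) ≤ k) ↔ (v (a - 1) == v a) = true) →
      ((PySem.List.pyRange a (a + m) 1).foldl (pvStep v) (q, k)).1
        = (q || (PySem.List.pyRange a (a + m) 1).any (pvWin v)) := by
  induction m with
  | zero =>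
    intro a q k _ _
    simp [PySem.List.pyRange_one_eq_nil (le_refl a)]
  | succ m ih =>
    intro a q k hk hinv
    have hlt : a < a + (m + 1 : Nat) := by push_cast; omega
    rw [PySem.List.pyRange_one_cons hlt]
    have hsh : a + ((m + 1 : Nat) : Int) = (a + 1) + (m : Nat) := by push_cast; ring
    rw [hsh]
    simp only [List.foldl_cons, List.any_cons]
    by_cases hpair : (v a == v (a + 1)) = true
    · have hstep : pvStep v (q, k) a = (q || (v (a - 1) == v a), k + 1) := by
        simp only [pvStep, hpair, if_pos]
        have : (decide ((3 : Int) ≤ k + 1)) = (v (a - 1) == v a) := by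
          by_cases h2 : (2 : Int) ≤ k
          · simp [hinv.mp h2, show (3 : Int) ≤ k + 1 by omega]
          · have hne : ¬ (v (a - 1) == v a) = true := fun h => h2 (hinv.mpr h)
            simp [show ¬ (3 : Int) ≤ k + 1 by omega, Bool.eq_false_iff.mpr hne]
        simp [this]
      rw [hstep, ih (a + 1) _ (k + 1) (by omega)
        (by constructor
            · intro _; simpa using hpair
            · intro _; omega)]
      have hwin : pvWin v a = (v (a - 1) == v a) := by
        simp [pvWin, hpair]
      rw [hwin, Bool.or_assoc]
    · have hstep : pvStep v (q, k) a = (q, 1) := by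
        simp [pvStep, hpair]
      rw [hstep, ih (a + 1) q 1 (by omega)
        (by constructor
            · intro h; omega
            · intro h; exact absurd (by simpa using h) hpair)]
      have hwin : pvWin v a = false := by
        simp [pvWin, Bool.eq_false_iff.mpr hpair]
      rw [hwin, Bool.false_or]

-- reindexing: windows over [1, n-1) named by their centre = windows over [0, n-2) named by their start
theorem pvShift (v : Int → String) (n : Int) :
    (PySem.List.pyRange 1 (n - 1) 1).any (pvWin v)
      = (PySem.List.pyRange 0 (n - 2) 1).any
          (fun c => (v c == v (c + 1)) && (v (c + 1) == v (c + 2))) := by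
  rw [PySem.List.pyRange_one, PySem.List.pyRange_one]
  rw [show (n - 1 - 1).toNat = (n - 2 - 0).toNat by omega]
  simp only [List.any_map]
  apply PySem.List.any_congr_mem
  intro k _
  simp only [Function.comp_apply, pvWin]
  rw [show (1 : Int) + (k : Int) - 1 = 0 + (k : Int) by ring,
      show (1 : Int) + (k : Int) + 1 = 0 + (k : Int) + 2 by ring,
      show (1 : Int) + (k : Int) = 0 + (k : Int) + 1 by ring]

-- one whole line: A's counter fold over range(n-1) equals B's window any over range(n-2)
theorem pvLine_eq (v : Int → String) (n : Int) (q : Bool) :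
    pvLineA v n q = (q || pvWinB v n) := by
  unfold pvLineA pvWinB
  by_cases hn : n ≤ 1
  · rw [PySem.List.pyRange_one_eq_nil (by omega : n - 1 ≤ 0),
        PySem.List.pyRange_one_eq_nil (by omega : n - 2 ≤ 0)]
    simp
  · -- n ≥ 2: peel the first step (c = 0), which never fires, then run the invariant
    rw [PySem.List.pyRange_one_cons (by omega : (0 : Int) < n - 1)]
    simp only [List.foldl_cons]
    have hn1 : n - 1 = (0 + 1) + (((n - 2).toNat : Nat) : Int) := by omega
    rw [← pvShift]
    by_cases hv : (v 0 == v (0 + 1)) = true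
    · have hv' : v 0 = v 1 := by simpa using hv
      have hstep : pvStep v (q, (1 : Int)) 0 = (q, 2) := by simp [pvStep, hv']
      rw [hstep, hn1, pvCounter_run v (n - 2).toNat (0 + 1) q 2 (by omega)
        (by constructor
            · intro _; simpa using hv
            · intro _; omega)]
      rw [show (0 : Int) + 1 = 1 by ring, show (1 : Int) + ((n - 2).toNat : Int) = n - 1 by omega]
    · have hv' : ¬ v 0 = v 1 := by simpa using hv
      have hstep : pvStep v (q, (1 : Int)) 0 = (q, 1) := by simp [pvStep, hv']
      rw [hstep, hn1, pvCounter_run v (n - 2).toNat (0 + 1) q 1 (by omega)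
        (by constructor
            · intro h; omega
            · intro h; exact absurd (by simpa using h) hv)]
      rw [show (0 : Int) + 1 = 1 by ring, show (1 : Int) + ((n - 2).toNat : Int) = n - 1 by omega]

-- ===== VERDICT (by name: the statement is the Claim_ definition above) =====
theorem analise_de_quebra_spec : Claim_equal_analise_de_quebra := by
  intro matriz _ _
  unfold Spec_analise_de_quebra analise_de_quebra analise_de_quebra_alt
  simp only []
  rw [PySem.List.foldl_congr_mem _ _
        (fun quebrou l => quebrou || pvWinB (fun c => pvLowAt matriz l c)
          (((PySem.List.pyGet? matriz 0).getD []).length : Int)) _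
        (fun q l _ => pvLine_eq (fun c => pvLowAt matriz l c) _ q),
      pvFoldl_or,
      PySem.List.foldl_congr_mem _ _
        (fun quebrou l => quebrou || pvWinB (fun c => pvLowAt matriz c l) (matriz.length : Int)) _
        (fun q l _ => pvLine_eq (fun c => pvLowAt matriz c l) _ q),
      pvFoldl_or]
  rw [Bool.false_or]
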